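-- pv_equiv track=rewrite | github.com/samuelguim/bits_deriva | Maratona2/palavras.py | palavras
-- ===== SOURCE A (Python) =====
-- from collections import deque
--
-- def palavras(setA, setB):
--     visited = set()
--     queue = deque()
--
--     for a in setA:
--         for b in setB:
--             queue.append((a, b))
--
--     while queue:
--         a, b = queue.popleft()
--         if (a, b) in visited:
--             continue
--
--         visited.add((a, b))
--
--         if a == b:
--             return 'S'
--
--         if a.startswith(b):
--             for bnext in setB:
--                 queue.append((a[len(b):], bnext))
--
--         if b.startswith(a):
--             for anext in setA:
--                 queue.append((anext, b[len(a):]))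
--
--     return 'N'
-- ===== SOURCE B (Python) =====
-- def palavras(setA, setB):
--     # Saturate the set of reachable overhang states (side, s) to a fixpoint,
--     # then test whether some overhang equals a word of the opposite set.
--     states = {(True, a) for a in setA}
--     while True:
--         new = set(states)
--         for side, s in states:
--             for w in (setB if side else setA):
--                 if s.startswith(w):
--                     new.add((side, s[len(w):]))
--                 elif w.startswith(s):
--                     new.add((not side, w[len(s):]))
--         if new == states:
--             break
--         states = new
--     return 'S' if any(s in (setB if side else setA) for side, s in states) else 'N'
-- ===== Notes on version B (the rewrite author's own statement) =====
-- stated objective: alternative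
-- what changed: A runs a BFS with an explicit deque over full (suffix, next-word) pairs seeded with all |A|*|B| initial pairs; B has no queue at all: it saturates a set of single overhang strings tagged by which side is ahead to a fixpoint by repeated whole-set expansion rounds, then checks membership of any overhang in the opposite word set.
import Mathlib
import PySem

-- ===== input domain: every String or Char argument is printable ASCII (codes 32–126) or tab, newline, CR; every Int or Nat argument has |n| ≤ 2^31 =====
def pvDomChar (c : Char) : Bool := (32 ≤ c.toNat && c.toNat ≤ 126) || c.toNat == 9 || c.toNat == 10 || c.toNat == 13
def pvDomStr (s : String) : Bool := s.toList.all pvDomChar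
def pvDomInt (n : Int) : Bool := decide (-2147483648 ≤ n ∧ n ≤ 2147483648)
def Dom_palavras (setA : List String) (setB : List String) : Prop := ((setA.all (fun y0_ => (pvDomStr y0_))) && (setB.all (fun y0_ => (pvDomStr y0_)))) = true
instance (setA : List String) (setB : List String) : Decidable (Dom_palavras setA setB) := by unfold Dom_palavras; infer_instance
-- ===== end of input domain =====

-- B replaces A's deque BFS over full (word-suffix, word) pairs by a queueless fixpoint
-- saturation of a set of single overhang strings tagged by side, followed by one
-- membership test (alternative re-implementation; return value only — neither program
-- mutates its arguments).

-- Both loops are written with an explicit fuel counter that only makes the recursion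
-- total; the fuel values below are proved sufficient (pvWlSuff / pvSaturate_spec), so
-- the fuel never runs out on any input.

-- shared primitive: Python's  x[len(y):]
def pvDropLen (x y : String) : String := PySem.Str.slice x (some (PySem.Str.len y)) none

-- suffix universes used only to compute a provably sufficient fuel bound
def pvSuffixes (w : String) : List String := w.toList.tails.map String.ofList
def pvSufUniv (ws : List String) : List String := (ws.flatMap pvSuffixes).dedup

-- ===== PORT A =====
def pvFuelA (setA setB : List String) : Nat :=
  (setA.length + setB.length + 1) * ((pvSufUniv setA).length * (pvSufUniv setB).length) +
    setA.length * setB.length + 1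

def palavrasLoop (setA setB : List String) :
    Nat → List (String × String) → List (String × String) → Option String
  | 0, _, _ => none
  | _fuel + 1, _visited, [] => some "N"
  | fuel + 1, visited, (a, b) :: rest =>
    if (a, b) ∈ visited then
      palavrasLoop setA setB fuel visited rest
    else
      let visited' := (a, b) :: visited
      if a == b then some "S"
      else
        let q1 := if PySem.Str.startswith a b then rest ++ setB.map (fun bnext => (pvDropLen a b, bnext)) else rest
        let q2 := if PySem.Str.startswith b a then q1 ++ setA.map (fun anext => (anext, pvDropLen b a)) else q1
        palavrasLoop setA setB fuel visited' q2

def palavras (setA : List String) (setB : List String) : String :=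
  match palavrasLoop setA setB (pvFuelA setA setB) []
      (setA.flatMap (fun a => setB.map (fun b => (a, b)))) with
  | some r => r
  | none => "N"

-- ===== PORT B =====
def pvFuelB (setA setB : List String) : Nat :=
  (pvSufUniv setA).length + (pvSufUniv setB).length + 1

-- the body of 'for w in (setB if side else setA): if/elif … new.add(…)'
def pvProcessState (setA setB : List String) (acc : PySem.Set (Bool × String))
    (t : Bool × String) : PySem.Set (Bool × String) :=
  (if t.1 then setB else setA).foldl (fun acc2 w =>
    if PySem.Str.startswith t.2 w then PySem.Set.add acc2 (t.1, pvDropLen t.2 w)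
    else if PySem.Str.startswith w t.2 then PySem.Set.add acc2 (!t.1, pvDropLen w t.2)
    else acc2) acc

-- one whole-set expansion round: new = set(states); for each state add its successors
def pvRound (setA setB : List String) (states : PySem.Set (Bool × String)) :
    PySem.Set (Bool × String) :=
  states.foldl (pvProcessState setA setB) (PySem.Set.ofList states)

-- 'while True: new = round(states); if new == states: break; states = new'
def pvSaturate (setA setB : List String) :
    Nat → PySem.Set (Bool × String) → PySem.Set (Bool × String)
  | 0, states => states
  | f + 1, states =>
    let new := pvRound setA setB states
    if PySem.Set.equal new states then states else pvSaturate setA setB f new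

def palavras_alt (setA : List String) (setB : List String) : String :=
  let states := pvSaturate setA setB (pvFuelB setA setB)
      (PySem.Set.ofList (setA.map (fun a => (true, a))))
  if states.any (fun t => decide (t.2 ∈ (if t.1 then setB else setA))) then "S" else "N"

-- ===== PRECONDITION & SPEC =====
def Spec_palavras (setA : List String) (setB : List String) (out : String) : Prop := out = palavras_alt setA setB
instance (setA : List String) (setB : List String) (out : String) : Decidable (Spec_palavras setA setB out) := by unfold Spec_palavras; infer_instance

-- ===== CLAIM (what is proved, stated in full; the proofs are below) =====
def Claim_equal_palavras : Prop := ∀ (setA : List String) (setB : List String), Dom_palavras setA setB → Spec_palavras setA setB (palavras setA setB)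

-- ===== LEMMAS AND PROOFS =====

-- generic worklist search with fuel (port A's loop is an instance)
def pvWlSearch {α : Type} [DecidableEq α] (succ : α → List α) (good : α → Bool) :
    Nat → List α → List α → Option Bool
  | 0, _, _ => none
  | _f + 1, _, [] => some false
  | f + 1, v, x :: rest =>
    if x ∈ v then pvWlSearch succ good f v rest
    else if good x then some true
    else pvWlSearch succ good f (x :: v) (rest ++ succ x)

inductive PvReach {α : Type} (succ : α → List α) : α → α → Prop
  | refl (x : α) : PvReach succ x x
  | tail {x y z : α} : PvReach succ x y → z ∈ succ y → PvReach succ x z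

theorem pvReach_head {α : Type} {succ : α → List α} {x y z : α}
    (h : y ∈ succ x) (r : PvReach succ y z) : PvReach succ x z := by
  induction r with
  | refl => exact .tail (.refl x) h
  | tail r hz ih => exact .tail ih hz

theorem pvReach_mem_closed {α : Type} {succ : α → List α} {F : List α}
    (hcl : ∀ x ∈ F, ∀ z ∈ succ x, z ∈ F) {t u : α} (ht : t ∈ F)
    (hr : PvReach succ t u) : u ∈ F := by
  induction hr with
  | refl => exact ht
  | tail hr hz ih => exact hcl _ ih _ hz

theorem pvWlSound {α : Type} [DecidableEq α] {succ : α → List α} {good : α → Bool} :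
    ∀ (f : Nat) (v q : List α), pvWlSearch succ good f v q = some true →
      ∃ x ∈ q, ∃ y, PvReach succ x y ∧ good y = true := by
  intro f
  induction f with
  | zero => intro v q h; simp [pvWlSearch] at h
  | succ f ih =>
    intro v q h
    match q with
    | [] => simp [pvWlSearch] at h
    | x :: rest =>
      rw [pvWlSearch] at h
      split at h
      · obtain ⟨x', hx', hy⟩ := ih _ _ h
        exact ⟨x', by simp [hx'], hy⟩
      · split at h
        · exact ⟨x, by simp, x, .refl x, by assumption⟩
        · obtain ⟨x', hx', y, hr, hg⟩ := ih _ _ h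
          rcases List.mem_append.mp hx' with h1 | h1
          · exact ⟨x', by simp [h1], y, hr, hg⟩
          · exact ⟨x, by simp, y, pvReach_head h1 hr, hg⟩

def PvClosed {α : Type} (succ : α → List α) (good : α → Bool) (v q : List α) : Prop :=
  ∀ x ∈ v, good x = false ∧ ∀ y ∈ succ x, y ∈ v ∨ y ∈ q

theorem pvClosed_reach {α : Type} {succ : α → List α} {good : α → Bool} {v : List α}
    (hc : PvClosed succ good v []) {x y : α} (hx : x ∈ v) (r : PvReach succ x y) :
    y ∈ v ∧ good y = false := by
  induction r with
  | refl => exact ⟨hx, (hc _ hx).1⟩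
  | tail r hz ih =>
    rcases (hc _ ih.1).2 _ hz with h | h
    · exact ⟨h, (hc _ h).1⟩
    · simp at h

theorem pvWlComplete {α : Type} [DecidableEq α] {succ : α → List α} {good : α → Bool} :
    ∀ (f : Nat) (v q : List α), pvWlSearch succ good f v q = some false →
      PvClosed succ good v q →
      ∀ x, (x ∈ v ∨ x ∈ q) → ∀ y, PvReach succ x y → good y = false := by
  intro f
  induction f with
  | zero => intro v q h; simp [pvWlSearch] at h
  | succ f ih =>
    intro v q h hc
    match q with
    | [] =>
      intro x hx y hr
      rcases hx with hx | hx
      · exact (pvClosed_reach hc hx hr).2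
      · simp at hx
    | x₀ :: rest =>
      rw [pvWlSearch] at h
      split at h
      · rename_i hmem
        have hc' : PvClosed succ good v rest := by
          intro z hz
          refine ⟨(hc z hz).1, fun y hy => ?_⟩
          rcases (hc z hz).2 y hy with h1 | h1
          · exact Or.inl h1
          · rcases List.mem_cons.mp h1 with rfl | h1
            · exact Or.inl hmem
            · exact Or.inr h1
        intro x hx
        rcases hx with hx | hx
        · exact ih _ _ h hc' x (Or.inl hx)
        · rcases List.mem_cons.mp hx with rfl | hx
          · exact ih _ _ h hc' x (Or.inl hmem)
          · exact ih _ _ h hc' x (Or.inr hx)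
      · split at h
        · simp at h
        · rename_i hmem hgood
          simp at hgood
          have hc' : PvClosed succ good (x₀ :: v) (rest ++ succ x₀) := by
            intro z hz
            rcases List.mem_cons.mp hz with rfl | hz
            · exact ⟨hgood, fun y hy => Or.inr (List.mem_append.mpr (Or.inr hy))⟩
            · refine ⟨(hc z hz).1, fun y hy => ?_⟩
              rcases (hc z hz).2 y hy with h1 | h1
              · exact Or.inl (List.mem_cons.mpr (Or.inr h1))
              · rcases List.mem_cons.mp h1 with rfl | h1
                · exact Or.inl (List.mem_cons.mpr (Or.inl rfl))
                · exact Or.inr (List.mem_append.mpr (Or.inl h1))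
          intro x hx
          rcases hx with hx | hx
          · exact ih _ _ h hc' x (Or.inl (List.mem_cons.mpr (Or.inr hx)))
          · rcases List.mem_cons.mp hx with rfl | hx
            · exact ih _ _ h hc' x (Or.inl (List.mem_cons.mpr (Or.inl rfl)))
            · exact ih _ _ h hc' x (Or.inr (List.mem_append.mpr (Or.inl hx)))

theorem pvNodupSubsetLen {α : Type} [DecidableEq α] {v U : List α}
    (h : v.Nodup) (hs : v ⊆ U) : v.length ≤ U.length :=
  List.Subperm.length_le (List.subperm_of_subset h hs)

theorem pvWlSuff {α : Type} [DecidableEq α] {succ : α → List α} {good : α → Bool}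
    (U : List α) (K : Nat)
    (hsucc : ∀ x ∈ U, ∀ y ∈ succ x, y ∈ U)
    (hK : ∀ x ∈ U, (succ x).length ≤ K) :
    ∀ (f : Nat) (v q : List α), v.Nodup → (∀ x ∈ v, x ∈ U) → (∀ x ∈ q, x ∈ U) →
      (K + 1) * (U.length - v.length) + q.length < f →
      (pvWlSearch succ good f v q).isSome = true := by
  intro f
  induction f with
  | zero => intro v q _ _ _ hlt; omega
  | succ f ih =>
    intro v q hnd hv hq hlt
    match q with
    | [] => simp [pvWlSearch]
    | x :: rest =>
      rw [pvWlSearch]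
      split
      · exact ih v rest hnd hv (fun z hz => hq z (by simp [hz])) (by simp at hlt ⊢; omega)
      · split
        · simp
        · rename_i hmem _
          have hxU : x ∈ U := hq x (by simp)
          have hnd' : (x :: v).Nodup := List.nodup_cons.mpr ⟨hmem, hnd⟩
          have hvlt : v.length < U.length := by
            have := pvNodupSubsetLen hnd' (fun z hz => by
              rcases List.mem_cons.mp hz with rfl | hz
              · exact hxU
              · exact hv z hz)
            simpa using this
          have hmul : (K + 1) * (U.length - v.length) =
              (K + 1) * (U.length - (v.length + 1)) + (K + 1) := by
            have h1 : U.length - v.length = (U.length - (v.length + 1)) + 1 := by omega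
            rw [h1, Nat.mul_add, Nat.mul_one]
          apply ih (x :: v) (rest ++ succ x) hnd'
          · intro z hz
            rcases List.mem_cons.mp hz with rfl | hz
            · exact hxU
            · exact hv z hz
          · intro z hz
            rcases List.mem_append.mp hz with hz | hz
            · exact hq z (by simp [hz])
            · exact hsucc x hxU z hz
          · have hlen : (succ x).length ≤ K := hK x hxU
            simp at hlt ⊢
            omega

-- ===== instantiation for port A =====
def pvSuccA (setA setB : List String) (p : String × String) : List (String × String) :=
  (if PySem.Str.startswith p.1 p.2 then setB.map (fun bnext => (pvDropLen p.1 p.2, bnext)) else []) ++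
  (if PySem.Str.startswith p.2 p.1 then setA.map (fun anext => (anext, pvDropLen p.2 p.1)) else [])

def pvGoodA (p : String × String) : Bool := p.1 == p.2

def pvInitA (setA setB : List String) : List (String × String) :=
  setA.flatMap (fun a => setB.map (fun b => (a, b)))

theorem pvLoopA_eq (setA setB : List String) :
    ∀ (f : Nat) (v q : List (String × String)),
      palavrasLoop setA setB f v q =
        (pvWlSearch (pvSuccA setA setB) pvGoodA f v q).map (fun r => if r then "S" else "N") := by
  intro f
  induction f with
  | zero => intro v q; rfl
  | succ f ih =>
    intro v q
    match q with
    | [] => rfl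
    | (a, b) :: rest =>
      rw [palavrasLoop, pvWlSearch]
      split
      · exact ih v rest
      · simp only [pvGoodA]
        split
        · rfl
        · rw [ih]
          congr 1
          simp only [pvSuccA]
          split <;> split <;> simp

-- ===== the successor relation of B's conceptual state graph (proof-side only) =====
def pvSuccB (setA setB : List String) (t : Bool × String) : List (Bool × String) :=
  (if t.1 then setB else setA).filterMap (fun w =>
    if PySem.Str.startswith t.2 w then some (t.1, pvDropLen t.2 w)
    else if PySem.Str.startswith w t.2 then some (!t.1, pvDropLen w t.2)
    else none)

def pvGoodB (setA setB : List String) (t : Bool × String) : Bool :=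
  decide (t.2 ∈ (if t.1 then setB else setA))

def pvInitB (setA : List String) : List (Bool × String) := setA.map (fun a => (true, a))

-- ===== string facts =====
theorem pvDropLen_toList (x y : String) :
    (pvDropLen x y).toList = x.toList.drop y.toList.length := by
  rw [pvDropLen, PySem.Str.toList_slice, PySem.Chars.slice_eq_listSlice, PySem.Str.len_eq]
  exact PySem.List.slice_from_natCast _ _

theorem pvStartswith_iff (x y : String) :
    PySem.Str.startswith x y = true ↔ y.toList <+: x.toList := by
  simp [PySem.Str.startswith_eq, PySem.Chars.startswith_iff]

theorem pvStartswith_both {x y : String} (h1 : PySem.Str.startswith x y = true)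
    (h2 : PySem.Str.startswith y x = true) : x = y := by
  rw [pvStartswith_iff] at h1 h2
  exact String.toList_inj.mp (h1.eq_of_length_le h2.length_le).symm

theorem pvMem_sufUniv {s : String} {ws : List String} :
    s ∈ pvSufUniv ws ↔ ∃ w ∈ ws, s.toList <:+ w.toList := by
  simp only [pvSufUniv, pvSuffixes, List.mem_dedup, List.mem_flatMap, List.mem_map,
    List.mem_tails]
  constructor
  · rintro ⟨w, hw, l, hl, rfl⟩
    exact ⟨w, hw, by simpa using hl⟩
  · rintro ⟨w, hw, hs⟩
    exact ⟨w, hw, s.toList, hs, by simp⟩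

theorem pvSelf_mem_sufUniv {w : String} {ws : List String} (h : w ∈ ws) : w ∈ pvSufUniv ws :=
  pvMem_sufUniv.mpr ⟨w, h, List.suffix_refl _⟩

theorem pvDrop_mem_sufUniv {s : String} {ws : List String} (h : s ∈ pvSufUniv ws) (y : String) :
    pvDropLen s y ∈ pvSufUniv ws := by
  obtain ⟨w, hw, hsuf⟩ := pvMem_sufUniv.mp h
  exact pvMem_sufUniv.mpr ⟨w, hw, by
    rw [pvDropLen_toList]
    exact (List.drop_suffix _ _).trans hsuf⟩

-- ===== fuel sufficiency for port A =====
def pvUA (setA setB : List String) : List (String × String) :=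
  List.product (pvSufUniv setA) (pvSufUniv setB)

def pvUB (setA setB : List String) : List (Bool × String) :=
  (pvSufUniv setA).map (fun s => (true, s)) ++ (pvSufUniv setB).map (fun s => (false, s))

theorem pvMem_UA {setA setB : List String} {a b : String} :
    (a, b) ∈ pvUA setA setB ↔ a ∈ pvSufUniv setA ∧ b ∈ pvSufUniv setB := List.mem_product

theorem pvUA_closed (setA setB : List String) :
    ∀ p ∈ pvUA setA setB, ∀ z ∈ pvSuccA setA setB p, z ∈ pvUA setA setB := by
  rintro ⟨a, b⟩ hp z hz
  obtain ⟨ha, hb⟩ := pvMem_UA.mp hp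
  rcases List.mem_append.mp hz with hz | hz
  · split at hz
    · obtain ⟨bn, hbn, rfl⟩ := List.mem_map.mp hz
      exact pvMem_UA.mpr ⟨pvDrop_mem_sufUniv ha b, pvSelf_mem_sufUniv hbn⟩
    · simp at hz
  · split at hz
    · obtain ⟨an, han, rfl⟩ := List.mem_map.mp hz
      exact pvMem_UA.mpr ⟨pvSelf_mem_sufUniv han, pvDrop_mem_sufUniv hb a⟩
    · simp at hz

theorem pvSuccA_len (setA setB : List String) (p : String × String) :
    (pvSuccA setA setB p).length ≤ setA.length + setB.length := by
  simp only [pvSuccA, List.length_append]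
  (split <;> split) <;> simp <;> omega

theorem pvInitA_sub (setA setB : List String) :
    ∀ p ∈ pvInitA setA setB, p ∈ pvUA setA setB := by
  intro p hp
  simp only [pvInitA, List.mem_flatMap, List.mem_map] at hp
  obtain ⟨a, ha, b, hb, rfl⟩ := hp
  exact pvMem_UA.mpr ⟨pvSelf_mem_sufUniv ha, pvSelf_mem_sufUniv hb⟩

theorem pvInitA_length (setA setB : List String) :
    (pvInitA setA setB).length = setA.length * setB.length := by
  induction setA with
  | nil => simp [pvInitA]
  | cons a t ih =>
    simp only [pvInitA, List.flatMap_cons, List.length_append, List.length_map,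
      List.length_cons] at ih ⊢
    rw [Nat.succ_mul]
    omega

theorem pvUA_length (setA setB : List String) :
    (pvUA setA setB).length = (pvSufUniv setA).length * (pvSufUniv setB).length := by
  simp [pvUA, List.product]

theorem pvSearchA_isSome (setA setB : List String) :
    (pvWlSearch (pvSuccA setA setB) pvGoodA (pvFuelA setA setB) [] (pvInitA setA setB)).isSome = true := by
  refine pvWlSuff (pvUA setA setB) (setA.length + setB.length)
    (pvUA_closed setA setB) (fun x _ => pvSuccA_len setA setB x) _ _ _ List.nodup_nil
    (by simp) (pvInitA_sub setA setB) ?_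
  rw [pvInitA_length, pvUA_length, pvFuelA]
  simp only [List.length_nil, Nat.sub_zero]
  omega

-- ===== universe facts for B's states =====
theorem pvMem_UB {setA setB : List String} {side : Bool} {s : String} :
    (side, s) ∈ pvUB setA setB ↔ s ∈ pvSufUniv (if side then setA else setB) := by
  cases side <;> simp [pvUB]

theorem pvUB_closed (setA setB : List String) :
    ∀ t ∈ pvUB setA setB, ∀ z ∈ pvSuccB setA setB t, z ∈ pvUB setA setB := by
  rintro ⟨side, s⟩ ht z hz
  have hs := pvMem_UB.mp ht
  simp only [pvSuccB] at hz
  obtain ⟨w, hw, hfw⟩ := List.mem_filterMap.mp hz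
  by_cases h1 : PySem.Str.startswith s w = true
  · rw [if_pos h1] at hfw
    obtain rfl := Option.some_inj.mp hfw
    exact pvMem_UB.mpr (pvDrop_mem_sufUniv hs w)
  · rw [if_neg h1] at hfw
    by_cases h2 : PySem.Str.startswith w s = true
    · rw [if_pos h2] at hfw
      obtain rfl := Option.some_inj.mp hfw
      refine pvMem_UB.mpr ?_
      cases side
      · exact pvDrop_mem_sufUniv (pvSelf_mem_sufUniv (by simpa using hw)) s
      · exact pvDrop_mem_sufUniv (pvSelf_mem_sufUniv (by simpa using hw)) s
    · rw [if_neg h2] at hfw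
      simp at hfw

theorem pvInitB_sub (setA setB : List String) :
    ∀ t ∈ pvInitB setA, t ∈ pvUB setA setB := by
  intro t ht
  obtain ⟨a, ha, rfl⟩ := List.mem_map.mp ht
  exact pvMem_UB.mpr (by simpa using pvSelf_mem_sufUniv ha)

theorem pvUB_length (setA setB : List String) :
    (pvUB setA setB).length = (pvSufUniv setA).length + (pvSufUniv setB).length := by
  simp [pvUB]

-- ===== characterisation of B's expansion round =====
theorem pvMem_processState (setA setB : List String) (t : Bool × String) :
    ∀ (l : List String) (acc : PySem.Set (Bool × String)) (x : Bool × String),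
      (x ∈ l.foldl (fun acc2 w =>
          if PySem.Str.startswith t.2 w then PySem.Set.add acc2 (t.1, pvDropLen t.2 w)
          else if PySem.Str.startswith w t.2 then PySem.Set.add acc2 (!t.1, pvDropLen w t.2)
          else acc2) acc) ↔
        x ∈ acc ∨ x ∈ l.filterMap (fun w =>
          if PySem.Str.startswith t.2 w then some (t.1, pvDropLen t.2 w)
          else if PySem.Str.startswith w t.2 then some (!t.1, pvDropLen w t.2)
          else none) := by
  intro l
  induction l with
  | nil => intro acc x; simp
  | cons w l ih =>
    intro acc x
    rw [List.foldl_cons, List.filterMap_cons]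
    by_cases h1 : PySem.Str.startswith t.2 w = true
    · rw [if_pos h1, if_pos h1, ih, List.mem_cons, PySem.Set.mem_add]
      tauto
    · rw [if_neg h1, if_neg h1]
      by_cases h2 : PySem.Str.startswith w t.2 = true
      · rw [if_pos h2, if_pos h2, ih, List.mem_cons, PySem.Set.mem_add]
        tauto
      · rw [if_neg h2, if_neg h2, ih]

theorem pvMem_processState' (setA setB : List String) (acc : PySem.Set (Bool × String))
    (t x : Bool × String) :
    x ∈ pvProcessState setA setB acc t ↔ x ∈ acc ∨ x ∈ pvSuccB setA setB t :=
  pvMem_processState setA setB t _ acc x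

theorem pvNodup_foldl_add_ite (setA setB : List String) (t : Bool × String) :
    ∀ (l : List String) (acc : PySem.Set (Bool × String)), acc.Nodup →
      (l.foldl (fun acc2 w =>
          if PySem.Str.startswith t.2 w then PySem.Set.add acc2 (t.1, pvDropLen t.2 w)
          else if PySem.Str.startswith w t.2 then PySem.Set.add acc2 (!t.1, pvDropLen w t.2)
          else acc2) acc).Nodup := by
  intro l
  induction l with
  | nil => intro acc h; simpa using h
  | cons w l ih =>
    intro acc h
    rw [List.foldl_cons]
    split
    · exact ih _ (PySem.Set.nodup_add _ _ h)
    · split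
      · exact ih _ (PySem.Set.nodup_add _ _ h)
      · exact ih _ h

theorem pvNodup_processState (setA setB : List String) (acc : PySem.Set (Bool × String))
    (t : Bool × String) (h : acc.Nodup) : (pvProcessState setA setB acc t).Nodup :=
  pvNodup_foldl_add_ite setA setB t _ acc h

theorem pvMem_foldl_process (setA setB : List String) :
    ∀ (l : List (Bool × String)) (acc : PySem.Set (Bool × String)) (x : Bool × String),
      x ∈ l.foldl (pvProcessState setA setB) acc ↔
        x ∈ acc ∨ ∃ t ∈ l, x ∈ pvSuccB setA setB t := by
  intro l
  induction l with
  | nil => intro acc x; simp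
  | cons t l ih =>
    intro acc x
    rw [List.foldl_cons, ih]
    simp only [pvMem_processState', List.mem_cons]
    constructor
    · rintro (( h | h) | ⟨u, hu, hx⟩)
      · exact Or.inl h
      · exact Or.inr ⟨t, Or.inl rfl, h⟩
      · exact Or.inr ⟨u, Or.inr hu, hx⟩
    · rintro (h | ⟨u, rfl | hu, hx⟩)
      · exact Or.inl (Or.inl h)
      · exact Or.inl (Or.inr hx)
      · exact Or.inr ⟨u, hu, hx⟩

theorem pvNodup_foldl_process (setA setB : List String) :
    ∀ (l : List (Bool × String)) (acc : PySem.Set (Bool × String)), acc.Nodup →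
      (l.foldl (pvProcessState setA setB) acc).Nodup := by
  intro l
  induction l with
  | nil => intro acc h; simpa using h
  | cons t l ih =>
    intro acc h
    exact ih _ (pvNodup_processState setA setB acc t h)

theorem pvMem_round (setA setB : List String) (states : PySem.Set (Bool × String))
    (x : Bool × String) :
    x ∈ pvRound setA setB states ↔ x ∈ states ∨ ∃ t ∈ states, x ∈ pvSuccB setA setB t := by
  rw [pvRound, pvMem_foldl_process, PySem.Set.mem_ofList]

theorem pvNodup_round (setA setB : List String) (states : PySem.Set (Bool × String)) :
    (pvRound setA setB states).Nodup :=
  pvNodup_foldl_process setA setB states _ (PySem.Set.nodup_ofList _)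

-- ===== the saturation reaches a fixpoint and computes exactly the reachable states =====
theorem pvSaturate_spec (setA setB : List String) :
    ∀ (f : Nat) (states : PySem.Set (Bool × String)), states.Nodup →
      (∀ x ∈ states, x ∈ pvUB setA setB) →
      (pvUB setA setB).length < f + states.length →
      (∀ x ∈ states, x ∈ pvSaturate setA setB f states) ∧
      (∀ x ∈ pvSaturate setA setB f states,
        ∃ t ∈ states, PvReach (pvSuccB setA setB) t x) ∧
      (∀ x ∈ pvSaturate setA setB f states,
        ∀ z ∈ pvSuccB setA setB x, z ∈ pvSaturate setA setB f states) := by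
  intro f
  induction f with
  | zero =>
    intro states hnd hub hlt
    have := pvNodupSubsetLen hnd hub
    omega
  | succ f ih =>
    intro states hnd hub hlt
    rw [pvSaturate]
    by_cases heq : PySem.Set.equal (pvRound setA setB states) states = true
    · rw [if_pos heq]
      refine ⟨fun x hx => hx, fun x hx => ⟨x, hx, .refl x⟩, fun x hx z hz => ?_⟩
      exact ((PySem.Set.equal_iff _ _).mp heq z).mp
        ((pvMem_round setA setB states z).mpr (Or.inr ⟨x, hx, hz⟩))
    · rw [if_neg heq]
      have hsub : ∀ x ∈ states, x ∈ pvRound setA setB states := fun x hx =>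
        (pvMem_round setA setB states x).mpr (Or.inl hx)
      have hex : ∃ x, x ∈ pvRound setA setB states ∧ x ∉ states := by
        by_contra hno
        push_neg at hno
        exact heq ((PySem.Set.equal_iff _ _).mpr (fun x => ⟨fun h => hno x h, hsub x⟩))
      obtain ⟨x0, hx0, hx0n⟩ := hex
      have hndr := pvNodup_round setA setB states
      have hubr : ∀ x ∈ pvRound setA setB states, x ∈ pvUB setA setB := by
        intro x hx
        rcases (pvMem_round setA setB states x).mp hx with h | ⟨t, ht, hs⟩
        · exact hub x h
        · exact pvUB_closed setA setB t (hub t ht) x hs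
      have hlen : states.length + 1 ≤ (pvRound setA setB states).length := by
        have hnd' : (x0 :: states).Nodup := List.nodup_cons.mpr ⟨hx0n, hnd⟩
        have := pvNodupSubsetLen hnd' (fun z hz => by
          rcases List.mem_cons.mp hz with rfl | hz
          · exact hx0
          · exact hsub z hz)
        simpa using this
      obtain ⟨h1, h2, h3⟩ := ih (pvRound setA setB states) hndr hubr (by omega)
      refine ⟨fun x hx => h1 x (hsub x hx), fun x hx => ?_, h3⟩
      obtain ⟨t, ht, hr⟩ := h2 x hx
      rcases (pvMem_round setA setB states t).mp ht with h | ⟨t', ht', hs⟩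
      · exact ⟨t, h, hr⟩
      · exact ⟨t', ht', pvReach_head hs hr⟩

-- ===== the two reachability goals and the bridge =====
def pvGA (setA setB : List String) : Prop :=
  ∃ p ∈ pvInitA setA setB, ∃ y, PvReach (pvSuccA setA setB) p y ∧ pvGoodA y = true

def pvGB (setA setB : List String) : Prop :=
  ∃ t ∈ pvInitB setA, ∃ u, PvReach (pvSuccB setA setB) t u ∧ pvGoodB setA setB u = true

-- reachable-from-initial predicates
def pvRA (setA setB : List String) (p : String × String) : Prop :=
  ∃ p0 ∈ pvInitA setA setB, PvReach (pvSuccA setA setB) p0 p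

def pvRB (setA setB : List String) (t : Bool × String) : Prop :=
  ∃ t0 ∈ pvInitB setA, PvReach (pvSuccB setA setB) t0 t

theorem pvRA_step {setA setB : List String} {p z : String × String}
    (h : pvRA setA setB p) (hz : z ∈ pvSuccA setA setB p) : pvRA setA setB z := by
  obtain ⟨p0, h0, hr⟩ := h
  exact ⟨p0, h0, .tail hr hz⟩

theorem pvRB_step {setA setB : List String} {t z : Bool × String}
    (h : pvRB setA setB t) (hz : z ∈ pvSuccB setA setB t) : pvRB setA setB z := by
  obtain ⟨t0, h0, hr⟩ := h
  exact ⟨t0, h0, .tail hr hz⟩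

theorem pvMem_initA {setA setB : List String} {a b : String}
    (ha : a ∈ setA) (hb : b ∈ setB) : (a, b) ∈ pvInitA setA setB := by
  simp only [pvInitA, List.mem_flatMap, List.mem_map]
  exact ⟨a, ha, b, hb, rfl⟩

theorem pvMem_initB {setA : List String} {a : String} (ha : a ∈ setA) :
    (true, a) ∈ pvInitB setA := List.mem_map.mpr ⟨a, ha, rfl⟩

-- membership in the successor lists, both directions
theorem pvMem_succA₁ {setA setB : List String} {a b bn : String}
    (h : PySem.Str.startswith a b = true) (hbn : bn ∈ setB) :
    (pvDropLen a b, bn) ∈ pvSuccA setA setB (a, b) := by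
  simp only [pvSuccA]
  exact List.mem_append.mpr (Or.inl (by rw [if_pos h]; exact List.mem_map.mpr ⟨bn, hbn, rfl⟩))

theorem pvMem_succA₂ {setA setB : List String} {a b an : String}
    (h : PySem.Str.startswith b a = true) (han : an ∈ setA) :
    (an, pvDropLen b a) ∈ pvSuccA setA setB (a, b) := by
  simp only [pvSuccA]
  exact List.mem_append.mpr (Or.inr (by rw [if_pos h]; exact List.mem_map.mpr ⟨an, han, rfl⟩))

theorem pvMem_succA_elim {setA setB : List String} {a b : String} {z : String × String}
    (hz : z ∈ pvSuccA setA setB (a, b)) :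
    (PySem.Str.startswith a b = true ∧ ∃ bn ∈ setB, z = (pvDropLen a b, bn)) ∨
      (PySem.Str.startswith b a = true ∧ ∃ an ∈ setA, z = (an, pvDropLen b a)) := by
  simp only [pvSuccA] at hz
  rcases List.mem_append.mp hz with h | h
  · split at h
    · obtain ⟨bn, hbn, rfl⟩ := List.mem_map.mp h
      exact Or.inl ⟨by assumption, bn, hbn, rfl⟩
    · simp at h
  · split at h
    · obtain ⟨an, han, rfl⟩ := List.mem_map.mp h
      exact Or.inr ⟨by assumption, an, han, rfl⟩
    · simp at h

theorem pvMem_succB₁ {setA setB : List String} {side : Bool} {s w : String}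
    (hw : w ∈ (if side then setB else setA)) (h : PySem.Str.startswith s w = true) :
    (side, pvDropLen s w) ∈ pvSuccB setA setB (side, s) := by
  simp only [pvSuccB]
  exact List.mem_filterMap.mpr ⟨w, hw, by rw [if_pos h]⟩

theorem pvMem_succB₂ {setA setB : List String} {side : Bool} {s w : String}
    (hw : w ∈ (if side then setB else setA)) (h1 : PySem.Str.startswith s w = false)
    (h2 : PySem.Str.startswith w s = true) :
    (!side, pvDropLen w s) ∈ pvSuccB setA setB (side, s) := by
  simp only [pvSuccB]
  exact List.mem_filterMap.mpr ⟨w, hw, by rw [h1, h2]; simp⟩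

theorem pvMem_succB_elim {setA setB : List String} {side : Bool} {s : String} {z : Bool × String}
    (hz : z ∈ pvSuccB setA setB (side, s)) :
    ∃ w ∈ (if side then setB else setA),
      (PySem.Str.startswith s w = true ∧ z = (side, pvDropLen s w)) ∨
        (PySem.Str.startswith s w = false ∧ PySem.Str.startswith w s = true ∧
          z = (!side, pvDropLen w s)) := by
  simp only [pvSuccB] at hz
  obtain ⟨w, hw, hfw⟩ := List.mem_filterMap.mp hz
  refine ⟨w, hw, ?_⟩
  by_cases h1 : PySem.Str.startswith s w = true
  · rw [if_pos h1] at hfw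
    exact Or.inl ⟨h1, (Option.some_inj.mp hfw).symm⟩
  · rw [if_neg h1] at hfw
    by_cases h2 : PySem.Str.startswith w s = true
    · rw [if_pos h2] at hfw
      exact Or.inr ⟨by simpa using h1, h2, (Option.some_inj.mp hfw).symm⟩
    · rw [if_neg h2] at hfw
      simp at hfw

-- A → B : a pair (a, b) is covered by an overhang state
def pvPA (setA setB : List String) (p : String × String) : Prop :=
  (p.2 ∈ setB ∧ pvRB setA setB (true, p.1)) ∨ (p.1 ∈ setA ∧ pvRB setA setB (false, p.2))

theorem pvPA_good {setA setB : List String} {c : String}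
    (h : pvPA setA setB (c, c)) : pvGB setA setB := by
  rcases h with ⟨hc, t0, h0, hr⟩ | ⟨hc, t0, h0, hr⟩
  · exact ⟨t0, h0, (true, c), hr, by simp [pvGoodB, hc]⟩
  · exact ⟨t0, h0, (false, c), hr, by simp [pvGoodB, hc]⟩

theorem pvPA_step {setA setB : List String} {p z : String × String}
    (hP : pvPA setA setB p) (hz : z ∈ pvSuccA setA setB p) :
    pvPA setA setB z ∨ pvGB setA setB := by
  obtain ⟨a, b⟩ := p
  by_cases hab : a = b
  · subst hab
    exact Or.inr (pvPA_good hP)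
  · left
    rcases pvMem_succA_elim hz with ⟨h1, bn, hbn, rfl⟩ | ⟨h2, an, han, rfl⟩
    · have hnot : PySem.Str.startswith b a = false := by
        by_contra h
        exact hab (pvStartswith_both h1 (by simpa using h))
      rcases hP with ⟨hb, hRB⟩ | ⟨ha, hRB⟩
      · exact Or.inl ⟨hbn, pvRB_step hRB (pvMem_succB₁ (side := true) (by simpa using hb) h1)⟩
      · refine Or.inl ⟨hbn, ?_⟩
        have := pvRB_step hRB (pvMem_succB₂ (side := false) (by simpa using ha) hnot h1)
        simpa using this
    · have hnot : PySem.Str.startswith a b = false := by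
        by_contra h
        exact hab (pvStartswith_both (by simpa using h) h2)
      rcases hP with ⟨hb, hRB⟩ | ⟨ha, hRB⟩
      · refine Or.inr ⟨han, ?_⟩
        have := pvRB_step hRB (pvMem_succB₂ (side := true) (by simpa using hb) hnot h2)
        simpa using this
      · exact Or.inr ⟨han, pvRB_step hRB (pvMem_succB₁ (side := false) (by simpa using ha) h2)⟩

theorem pvReach_PA {setA setB : List String} {p y : String × String}
    (hr : PvReach (pvSuccA setA setB) p y) (hP : pvPA setA setB p) :
    pvPA setA setB y ∨ pvGB setA setB := by
  induction hr with
  | refl => exact Or.inl hP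
  | tail hr hz ih =>
    rcases ih with h | h
    · exact pvPA_step h hz
    · exact Or.inr h

theorem pvGA_to_GB (setA setB : List String) (h : pvGA setA setB) : pvGB setA setB := by
  obtain ⟨p0, hp0, y, hr, hg⟩ := h
  simp only [pvInitA, List.mem_flatMap, List.mem_map] at hp0
  obtain ⟨a, ha, b, hb, rfl⟩ := hp0
  have hP : pvPA setA setB (a, b) := Or.inl ⟨hb, (true, a), pvMem_initB ha, .refl _⟩
  rcases pvReach_PA hr hP with h | h
  · obtain ⟨c, d⟩ := y
    have hcd : c = d := by simpa [pvGoodA] using hg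
    subst hcd
    exact pvPA_good h
  · exact h

-- B → A : an overhang state covers all pairs with any word on the other side
def pvQB (setA setB : List String) : Bool × String → Prop
  | (true, s) => ∀ b ∈ setB, pvRA setA setB (s, b)
  | (false, s) => ∀ a ∈ setA, pvRA setA setB (a, s)

theorem pvQB_step {setA setB : List String} {t z : Bool × String}
    (hQ : pvQB setA setB t) (hz : z ∈ pvSuccB setA setB t) : pvQB setA setB z := by
  obtain ⟨side, s⟩ := t
  obtain ⟨w, hw, hcase⟩ := pvMem_succB_elim hz
  cases side
  · have hw' : w ∈ setA := by simpa using hw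
    have hRA : pvRA setA setB (w, s) := hQ w hw'
    rcases hcase with ⟨h1, rfl⟩ | ⟨h1, h2, rfl⟩
    · intro a haA
      exact pvRA_step hRA (pvMem_succA₂ h1 haA)
    · intro b hbB
      exact pvRA_step hRA (pvMem_succA₁ h2 hbB)
  · have hw' : w ∈ setB := by simpa using hw
    have hRA : pvRA setA setB (s, w) := hQ w hw'
    rcases hcase with ⟨h1, rfl⟩ | ⟨h1, h2, rfl⟩
    · intro b hbB
      exact pvRA_step hRA (pvMem_succA₁ h1 hbB)
    · intro a haA
      exact pvRA_step hRA (pvMem_succA₂ h2 haA)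

theorem pvReach_QB {setA setB : List String} {t u : Bool × String}
    (hr : PvReach (pvSuccB setA setB) t u) (hQ : pvQB setA setB t) :
    pvQB setA setB u := by
  induction hr with
  | refl => exact hQ
  | tail hr hz ih => exact pvQB_step ih hz

theorem pvGB_to_GA (setA setB : List String) (h : pvGB setA setB) : pvGA setA setB := by
  obtain ⟨t0, ht0, u, hr, hg⟩ := h
  obtain ⟨a, ha, rfl⟩ := List.mem_map.mp ht0
  have hQ0 : pvQB setA setB (true, a) := fun b hb => ⟨(a, b), pvMem_initA ha hb, .refl _⟩
  have hQ := pvReach_QB hr hQ0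
  obtain ⟨side, u2⟩ := u
  cases side
  · have hu : u2 ∈ setA := by simpa [pvGoodB] using hg
    obtain ⟨p0, h0, hr'⟩ := hQ u2 hu
    exact ⟨p0, h0, (u2, u2), hr', by simp [pvGoodA]⟩
  · have hu : u2 ∈ setB := by simpa [pvGoodB] using hg
    obtain ⟨p0, h0, hr'⟩ := hQ u2 hu
    exact ⟨p0, h0, (u2, u2), hr', by simp [pvGoodA]⟩

theorem pvGA_iff_pvGB (setA setB : List String) : pvGA setA setB ↔ pvGB setA setB :=
  ⟨pvGA_to_GB setA setB, pvGB_to_GA setA setB⟩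

-- ===== results of the two ports =====
theorem pvPalavras_eq (setA setB : List String) :
    (pvGA setA setB → palavras setA setB = "S") ∧ (¬ pvGA setA setB → palavras setA setB = "N") := by
  obtain ⟨br, hbr⟩ := Option.isSome_iff_exists.mp (pvSearchA_isSome setA setB)
  have heq : palavras setA setB = if br then "S" else "N" := by
    unfold palavras
    rw [show (setA.flatMap fun a => setB.map fun b => (a, b)) = pvInitA setA setB from rfl,
      pvLoopA_eq, hbr]
    rfl
  cases br with
  | true =>
    have hGA : pvGA setA setB := by
      obtain ⟨x, hx, y, hr, hg⟩ := pvWlSound _ _ _ hbr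
      exact ⟨x, hx, y, hr, hg⟩
    exact ⟨fun _ => by simp [heq], fun h => absurd hGA h⟩
  | false =>
    have hnGA : ¬ pvGA setA setB := by
      rintro ⟨p, hp, y, hr, hg⟩
      have := pvWlComplete _ _ _ hbr (by intro x hx; simp at hx) p (Or.inr hp) y hr
      rw [this] at hg
      exact Bool.false_ne_true hg
    exact ⟨fun h => absurd h hnGA, fun _ => by simp [heq]⟩

theorem pvPalavrasAlt_eq (setA setB : List String) :
    (pvGB setA setB → palavras_alt setA setB = "S") ∧
      (¬ pvGB setA setB → palavras_alt setA setB = "N") := by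
  have hndi : (PySem.Set.ofList (setA.map (fun a => (true, a)))).Nodup :=
    PySem.Set.nodup_ofList _
  have hubi : ∀ x ∈ PySem.Set.ofList (setA.map (fun a => (true, a))), x ∈ pvUB setA setB := by
    intro x hx
    exact pvInitB_sub setA setB x ((PySem.Set.mem_ofList _ _).mp hx)
  obtain ⟨hsub, hsound, hclosed⟩ := pvSaturate_spec setA setB (pvFuelB setA setB)
    (PySem.Set.ofList (setA.map (fun a => (true, a)))) hndi hubi
    (by rw [pvUB_length, pvFuelB]; omega)
  have hany : ((pvSaturate setA setB (pvFuelB setA setB)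
        (PySem.Set.ofList (setA.map (fun a => (true, a))))).any
      (fun t => decide (t.2 ∈ (if t.1 then setB else setA))) = true) ↔ pvGB setA setB := by
    rw [List.any_eq_true]
    constructor
    · rintro ⟨t, ht, hg⟩
      obtain ⟨t0, ht0, hr⟩ := hsound t ht
      exact ⟨t0, (PySem.Set.mem_ofList _ _).mp ht0, t, hr, hg⟩
    · rintro ⟨t0, ht0, u, hr, hg⟩
      refine ⟨u, ?_, hg⟩
      exact pvReach_mem_closed hclosed (hsub t0 ((PySem.Set.mem_ofList _ _).mpr ht0)) hr
  unfold palavras_alt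
  constructor
  · intro h
    rw [if_pos (hany.mpr h)]
  · intro h
    rw [if_neg (fun hc => h (hany.mp hc))]

-- ===== VERDICT (by name: the statement is the Claim_ definition above) =====
theorem palavras_spec : Claim_equal_palavras := by
  intro setA setB _
  show palavras setA setB = palavras_alt setA setB
  by_cases h : pvGA setA setB
  · rw [(pvPalavras_eq setA setB).1 h, (pvPalavrasAlt_eq setA setB).1 ((pvGA_iff_pvGB setA setB).mp h)]
  · rw [(pvPalavras_eq setA setB).2 h,
      (pvPalavrasAlt_eq setA setB).2 (fun hb => h ((pvGA_iff_pvGB setA setB).mpr hb))]
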